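-- pv_equiv track=rewrite | github.com/Pyk3i/IP---AED-I | parcial1.py | contar_traducciones_iguales
-- ===== SOURCE A (Python) =====
-- def contar_traducciones_iguales(ing: dict[str, str], ale: dict[str, str]) -> int:
--     keys_ing = list(ing.keys())
--     keys_ale = list(ale.keys())
--     contador = 0
--     for i in range(len(keys_ing)):
--         for j in range(len(keys_ale)):
--             if keys_ing[i] == keys_ale[j] and ing[keys_ing[i]] == ale[keys_ale[j]]:
--                 contador = contador + 1
--     return contador
-- ===== SOURCE B (Python) =====
-- def contar_traducciones_iguales(ing: dict[str, str], ale: dict[str, str]) -> int: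
--     comunes = ing.keys() & ale.keys()
--     return sum(1 for k in comunes if ing[k] == ale[k])
-- ===== Notes on version B (the rewrite author's own statement) =====
-- stated objective: simpler
-- what changed: Replaces the quadratic nested index loops with a precomputed key intersection followed by one pass that only compares values.
import Mathlib
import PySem

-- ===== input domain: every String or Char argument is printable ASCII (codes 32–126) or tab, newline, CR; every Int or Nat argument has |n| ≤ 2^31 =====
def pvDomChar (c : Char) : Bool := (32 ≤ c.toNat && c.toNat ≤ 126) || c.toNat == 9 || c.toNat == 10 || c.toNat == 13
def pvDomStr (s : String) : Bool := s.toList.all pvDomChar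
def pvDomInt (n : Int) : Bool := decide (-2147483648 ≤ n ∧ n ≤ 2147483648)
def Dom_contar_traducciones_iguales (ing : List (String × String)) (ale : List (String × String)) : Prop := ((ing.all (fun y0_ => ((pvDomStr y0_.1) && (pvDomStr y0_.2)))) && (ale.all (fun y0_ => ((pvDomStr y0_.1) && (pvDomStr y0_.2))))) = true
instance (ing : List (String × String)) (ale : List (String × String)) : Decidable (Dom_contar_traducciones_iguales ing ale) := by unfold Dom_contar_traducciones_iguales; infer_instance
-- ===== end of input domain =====

-- B replaces A's quadratic nested index loops with a precomputed key intersection plus one value-comparing pass (simpler, asymptotically faster).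

-- ===== PORT A =====
def contar_traducciones_iguales (ing : List (String × String)) (ale : List (String × String)) : Int :=
  let keys_ing := (PySem.Dict.ofList ing).keys
  let keys_ale := (PySem.Dict.ofList ale).keys
  (PySem.List.pyRange 0 (keys_ing.length : Int) 1).foldl (fun contador i =>
    (PySem.List.pyRange 0 (keys_ale.length : Int) 1).foldl (fun c j =>
      if (PySem.List.pyGetD keys_ing i "" == PySem.List.pyGetD keys_ale j "") &&
         ((PySem.Dict.ofList ing).getD (PySem.List.pyGetD keys_ing i "") "" ==
          (PySem.Dict.ofList ale).getD (PySem.List.pyGetD keys_ale j "") "")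
      then c + 1 else c) contador) 0

-- ===== PORT B =====
def contar_traducciones_iguales_alt (ing : List (String × String)) (ale : List (String × String)) : Int :=
  let di := PySem.Dict.ofList ing
  let da := PySem.Dict.ofList ale
  let comunes := di.keys.filter (fun k => da.contains k)
  ((comunes.filter (fun k => di.getD k "" == da.getD k "")).length : Int)

-- ===== PRECONDITION & SPEC =====
def Spec_contar_traducciones_iguales (ing : List (String × String)) (ale : List (String × String)) (out : Int) : Prop := out = contar_traducciones_iguales_alt ing ale
instance (ing : List (String × String)) (ale : List (String × String)) (out : Int) : Decidable (Spec_contar_traducciones_iguales ing ale out) := by unfold Spec_contar_traducciones_iguales; infer_instance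

-- ===== CLAIM (what is proved, stated in full; the proofs are below) =====
def Claim_equal_contar_traducciones_iguales : Prop := ∀ (ing : List (String × String)) (ale : List (String × String)), Dom_contar_traducciones_iguales ing ale → Spec_contar_traducciones_iguales ing ale (contar_traducciones_iguales ing ale)

-- ===== LEMMAS AND PROOFS =====

-- a for-loop that conditionally increments an Int counter counts the matches
theorem pvFoldCount {α : Type} (p : α → Bool) :
    ∀ (l : List α) (c : Int),
      l.foldl (fun c' k => if p k then c' + 1 else c') c = c + (l.countP p : Int) := by
  intro l
  induction l with
  | nil => simp
  | cons x xs ih =>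
    intro c
    simp only [List.foldl, List.countP_cons, ih]
    by_cases h : p x = true <;> simp [h, add_comm, add_left_comm]

-- same, with the increment written as adding an if-expression
theorem pvFoldCount' {α : Type} (p : α → Bool) :
    ∀ (l : List α) (c : Int),
      l.foldl (fun c' k => c' + (if p k then (1 : Int) else 0)) c = c + (l.countP p : Int) := by
  intro l c
  rw [show (fun c' k => c' + (if p k then (1 : Int) else 0)) =
        (fun c' k => if p k then c' + 1 else c') from ?_, pvFoldCount]
  funext c' k; by_cases h : p k = true <;> simp [h]
-- on a duplicate-free list, counting elements equal to k that satisfy q is a membership test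
theorem pvCountPNodup (k : String) (q : String → Bool) :
    ∀ (l : List String), l.Nodup →
      l.countP (fun k' => (k == k') && q k') =
        (if l.contains k && q k then 1 else 0) := by
  intro l
  induction l with
  | nil => simp
  | cons a xs ih =>
    intro hnd
    have hnd' := hnd.of_cons
    have hna : a ∉ xs := (List.nodup_cons.mp hnd).1
    by_cases hk : k = a
    · subst hk
      have h0 : xs.countP (fun k' => (k == k') && q k') = 0 := by
        rw [List.countP_eq_zero]
        intro x hx
        simp only [Bool.and_eq_true, beq_iff_eq]
        rintro ⟨rfl, -⟩; exact hna hx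
      simp [List.countP_cons, h0]
    · have : ((k == a) && q a) = false := by simp [beq_iff_eq, hk]
      simp only [List.countP_cons, this, ih hnd', List.contains_cons]
      simp [hk]

theorem contar_traducciones_iguales_eq (ing ale : List (String × String)) :
    contar_traducciones_iguales ing ale = contar_traducciones_iguales_alt ing ale := by
  unfold contar_traducciones_iguales contar_traducciones_iguales_alt
  simp only []
  set di := PySem.Dict.ofList ing with hdi
  set da := PySem.Dict.ofList ale with hda
  set ki := di.keys with hki
  set ka := da.keys with hka
  rw [PySem.List.foldl_pyRange_zero_pyGetD'
      (f := fun (contador : Int) (k : String) =>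
        (PySem.List.pyRange 0 (ka.length : Int) 1).foldl (fun c j =>
          if (k == PySem.List.pyGetD ka j "") &&
             (di.getD k "" == da.getD (PySem.List.pyGetD ka j "") "")
          then c + 1 else c) contador)]
  have hinner : ∀ (k : String) (c : Int),
      (PySem.List.pyRange 0 (ka.length : Int) 1).foldl (fun c j =>
          if (k == PySem.List.pyGetD ka j "") &&
             (di.getD k "" == da.getD (PySem.List.pyGetD ka j "") "")
          then c + 1 else c) c
        = c + (if ka.contains k && (di.getD k "" == da.getD k "") then 1 else 0) := by
    intro k c
    rw [PySem.List.foldl_pyRange_zero_pyGetD'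
        (f := fun (c : Int) (k' : String) =>
          if (k == k') && (di.getD k "" == da.getD k' "") then c + 1 else c)]
    rw [pvFoldCount, pvCountPNodup k (fun k' => di.getD k "" == da.getD k' "") ka
        (hka ▸ PySem.Dict.nodup_keys_ofList ale)]
    split <;> simp
  calc ki.foldl (fun contador k =>
        (PySem.List.pyRange 0 (ka.length : Int) 1).foldl (fun c j =>
          if (k == PySem.List.pyGetD ka j "") &&
             (di.getD k "" == da.getD (PySem.List.pyGetD ka j "") "")
          then c + 1 else c) contador) 0
      = ki.foldl (fun c k =>
          c + (if ka.contains k && (di.getD k "" == da.getD k "") then 1 else 0)) 0 := by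
        apply PySem.List.foldl_congr_mem
        intro c k _; exact hinner k c
    _ = ((ki.countP (fun k => ka.contains k && (di.getD k "" == da.getD k ""))) : Int) := by
        rw [pvFoldCount']; simp
    _ = (((ki.filter (fun k => da.contains k)).filter
            (fun k => di.getD k "" == da.getD k "")).length : Int) := by
        rw [List.filter_filter, ← List.countP_eq_length_filter]
        congr 1
        apply List.countP_congr
        intro k _
        simp [PySem.Dict.contains_iff_mem_keys, hka, Bool.and_comm]; tauto

-- ===== VERDICT (by name: the statement is the Claim_ definition above) =====
theorem contar_traducciones_iguales_spec : Claim_equal_contar_traducciones_iguales := by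
  intro ing ale _
  exact contar_traducciones_iguales_eq ing ale
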